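-- pv_equiv track=rewrite | github.com/hattum/ijwit | classes/priorityfold.py | scoreH
-- ===== SOURCE A (Python) =====
-- def scoreH(coordsmatch):
--     """
--     returns score of all bonds among the assigned coordinates of a single proteine
--     """
--     scoreH = 0
--     scoreC = 0
--     for i in range(len(coordsmatch)):
--         current = coordsmatch[i][1]
--         for j in range(i+2, len(coordsmatch)):
--             next = coordsmatch[j][1]
--             if current[0] == next[0] and (current[1] == next[1] - 1 or current[1] == next[1] +1) and coordsmatch[i][0] == "H" and coordsmatch[j][0] == "H":
--                 scoreH += -1
--             elif current[0] == next[0] and (current[1] == next[1] - 1 or current[1] == next[1] +1) and coordsmatch[i][0] == "H" and coordsmatch[j][0] == "C":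
--                 scoreH += -1
--             elif current[0] == next[0] and (current[1] == next[1] - 1 or current[1] == next[1] +1) and coordsmatch[i][0] == "C" and coordsmatch[j][0] == "C":
--                 scoreC += -5
--             elif current[0] == next[0] and (current[1] == next[1] - 1 or current[1] == next[1] +1) and coordsmatch[i][0] == "C" and coordsmatch[j][0] == "H":
--                 scoreC += -1
--             elif current[1] == next[1] and (current[0] == next[0] - 1 or current[0] == next[0] +1) and coordsmatch[i][0] == "H" and coordsmatch[j][0] == "H":
--                 scoreH += -1
--             elif current[1] == next[1] and (current[0] == next[0] - 1 or current[0] == next[0] +1) and coordsmatch[i][0] == "H" and coordsmatch[j][0] == "C":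
--                 scoreH += -1
--             elif current[1] == next[1] and (current[0] == next[0] - 1 or current[0] == next[0] +1) and coordsmatch[i][0] == "C" and coordsmatch[j][0] == "C":
--                 scoreC += -5
--             elif current[1] == next[1] and (current[0] == next[0] - 1 or current[0] == next[0] +1) and coordsmatch[i][0] == "C" and coordsmatch[j][0] == "H":
--                 scoreC += -1
--     return scoreH + scoreC
-- ===== SOURCE B (Python) =====
-- def scoreH(coordsmatch):
--     """O(n) rescore: hash each assigned coordinate to its (index, type), then
--     for every point look up its 4 grid neighbours and score bonds with chain
--     distance >= 2."""
--     def w(a, b):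
--         if a == "H":
--             return -1 if (b == "H" or b == "C") else 0
--         if a == "C":
--             if b == "C":
--                 return -5
--             if b == "H":
--                 return -1
--         return 0
--     index = {}
--     for j, (t, c) in enumerate(coordsmatch):
--         if len(c) >= 2:
--             index.setdefault((c[0], c[1]), []).append((j, t))
--     total = 0
--     for i, (t, c) in enumerate(coordsmatch):
--         if len(c) >= 2:
--             x, y = c[0], c[1]
--             for nb in ((x, y - 1), (x, y + 1), (x - 1, y), (x + 1, y)):
--                 for j, u in index.get(nb, []):
--                     if j >= i + 2:
--                         total += w(t, u)
--     return total
-- ===== Notes on version B (the rewrite author's own statement) =====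
-- stated objective: faster
-- what changed: Replaces A's all-pairs double loop with a single-pass hash index from grid coordinate to (chain index, type), then scores each point by looking up its 4 grid neighbours and keeping partners with chain distance >= 2.
import Mathlib
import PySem

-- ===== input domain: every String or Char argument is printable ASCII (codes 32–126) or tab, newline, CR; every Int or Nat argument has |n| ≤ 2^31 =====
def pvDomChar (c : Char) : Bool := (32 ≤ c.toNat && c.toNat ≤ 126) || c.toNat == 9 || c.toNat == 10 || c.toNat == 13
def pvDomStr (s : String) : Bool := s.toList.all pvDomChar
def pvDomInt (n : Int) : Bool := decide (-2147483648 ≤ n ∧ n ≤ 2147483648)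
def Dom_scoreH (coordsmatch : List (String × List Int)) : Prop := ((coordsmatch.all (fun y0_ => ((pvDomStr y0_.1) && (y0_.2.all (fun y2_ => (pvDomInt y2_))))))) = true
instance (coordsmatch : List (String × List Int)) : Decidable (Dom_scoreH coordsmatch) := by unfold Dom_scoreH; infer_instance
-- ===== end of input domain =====

-- B replaces A's all-pairs double loop by a coordinate hash index plus 4-neighbour lookups; equal on Pre_ (the inputs where A's chained indexing does not raise).


-- ===== PORT A =====
-- inner-loop body of A: the eight elif branches updating the (scoreH, scoreC) pair.
-- current[0]/current[1]/next[0]/next[1] are ported as pyGetD with default 0: exact on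
-- Pre_scoreH, where every entry A actually subscripts has at least two coordinates.
def scoreH_body (coordsmatch : List (String × List Int)) (i : Int) (s : Int × Int) (j : Int) : Int × Int :=
  let current : List Int := ((PySem.List.pyGet? coordsmatch i).map (·.2)).getD []
  let next : List Int := ((PySem.List.pyGet? coordsmatch j).map (·.2)).getD []
  let ti : String := ((PySem.List.pyGet? coordsmatch i).map (·.1)).getD ""
  let tj : String := ((PySem.List.pyGet? coordsmatch j).map (·.1)).getD ""
  let c0 := PySem.List.pyGetD current 0 0
  let c1 := PySem.List.pyGetD current 1 0
  let n0 := PySem.List.pyGetD next 0 0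
  let n1 := PySem.List.pyGetD next 1 0
  if c0 = n0 ∧ (c1 = n1 - 1 ∨ c1 = n1 + 1) ∧ ti = "H" ∧ tj = "H" then (s.1 + -1, s.2)
  else if c0 = n0 ∧ (c1 = n1 - 1 ∨ c1 = n1 + 1) ∧ ti = "H" ∧ tj = "C" then (s.1 + -1, s.2)
  else if c0 = n0 ∧ (c1 = n1 - 1 ∨ c1 = n1 + 1) ∧ ti = "C" ∧ tj = "C" then (s.1, s.2 + -5)
  else if c0 = n0 ∧ (c1 = n1 - 1 ∨ c1 = n1 + 1) ∧ ti = "C" ∧ tj = "H" then (s.1, s.2 + -1)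
  else if c1 = n1 ∧ (c0 = n0 - 1 ∨ c0 = n0 + 1) ∧ ti = "H" ∧ tj = "H" then (s.1 + -1, s.2)
  else if c1 = n1 ∧ (c0 = n0 - 1 ∨ c0 = n0 + 1) ∧ ti = "H" ∧ tj = "C" then (s.1 + -1, s.2)
  else if c1 = n1 ∧ (c0 = n0 - 1 ∨ c0 = n0 + 1) ∧ ti = "C" ∧ tj = "C" then (s.1, s.2 + -5)
  else if c1 = n1 ∧ (c0 = n0 - 1 ∨ c0 = n0 + 1) ∧ ti = "C" ∧ tj = "H" then (s.1, s.2 + -1)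
  else s

def scoreH (coordsmatch : List (String × List Int)) : Int :=
  let n : Int := coordsmatch.length
  let st : Int × Int :=
    (PySem.List.pyRange 0 n 1).foldl
      (fun s i => (PySem.List.pyRange (i + 2) n 1).foldl (scoreH_body coordsmatch i) s)
      (0, 0)
  st.1 + st.2

-- ===== PORT B =====
-- Source B's helper w: bond weight between a point of type a and a later adjacent point of type b
def pvW (a b : String) : Int :=
  if a = "H" then (if b = "H" ∨ b = "C" then -1 else 0)
  else if a = "C" then (if b = "C" then -5 else if b = "H" then -1 else 0)
  else 0

-- Source B's first loop: hash (c[0], c[1]) -> list of (chain index, type)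
def scoreH_alt_index (coordsmatch : List (String × List Int)) :
    PySem.Dict (Int × Int) (List (Nat × String)) :=
  coordsmatch.zipIdx.foldl
    (fun d e =>
      if 2 ≤ e.1.2.length then
        d.modify (PySem.List.pyGetD e.1.2 0 0, PySem.List.pyGetD e.1.2 1 0) [] (· ++ [(e.2, e.1.1)])
      else d)
    PySem.Dict.empty

def scoreH_alt (coordsmatch : List (String × List Int)) : Int :=
  let idx := scoreH_alt_index coordsmatch
  coordsmatch.zipIdx.foldl
    (fun total e =>
      if 2 ≤ e.1.2.length then
        let x := PySem.List.pyGetD e.1.2 0 0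
        let y := PySem.List.pyGetD e.1.2 1 0
        [(x, y - 1), (x, y + 1), (x - 1, y), (x + 1, y)].foldl
          (fun t nb =>
            (idx.getD nb []).foldl
              (fun t ju => if e.2 + 2 ≤ ju.1 then t + pvW e.1.1 ju.2 else t) t)
          total
      else total)
    0

-- ===== PRECONDITION & SPEC =====
-- Exactly the inputs on which A returns: every entry that participates in some compared
-- pair (i, j) with j ≥ i + 2 — i.e. whose index k has k + 2 < n or k ≥ 2 — must carry at
-- least two coordinates, else A's current[0]/current[1]/next[0]/next[1] raises IndexError.
def Pre_scoreH (coordsmatch : List (String × List Int)) : Prop :=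
  ∀ e ∈ coordsmatch.zipIdx, (e.2 + 2 < coordsmatch.length ∨ 2 ≤ e.2) → 2 ≤ e.1.2.length
instance (coordsmatch : List (String × List Int)) : Decidable (Pre_scoreH coordsmatch) := by
  unfold Pre_scoreH; infer_instance

def pvWitness_scoreH : (List (String × List Int)) := [("H", [0, 0]), ("H", [0, 1]), ("H", [1, 0])]

def Spec_scoreH (coordsmatch : List (String × List Int)) (out : Int) : Prop := out = scoreH_alt coordsmatch
instance (coordsmatch : List (String × List Int)) (out : Int) : Decidable (Spec_scoreH coordsmatch out) := by unfold Spec_scoreH; infer_instance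

-- ===== CLAIM (what is proved, stated in full; the proofs are below) =====
def Claim_equal_scoreH : Prop := ∀ (coordsmatch : List (String × List Int)), Dom_scoreH coordsmatch → Pre_scoreH coordsmatch → Spec_scoreH coordsmatch (scoreH coordsmatch)

-- ===== LEMMAS AND PROOFS =====

-- the (x, y) grid point of an entry, read the way both ports read it
def pvPt (p : String × List Int) : Int × Int :=
  (PySem.List.pyGetD p.2 0 0, PySem.List.pyGetD p.2 1 0)

-- grid adjacency exactly as A tests it (current = p, next = q)
abbrev pvAdj (p q : Int × Int) : Prop :=
  (p.1 = q.1 ∧ (p.2 = q.2 - 1 ∨ p.2 = q.2 + 1)) ∨ (p.2 = q.2 ∧ (p.1 = q.1 - 1 ∨ p.1 = q.1 + 1))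

-- the entry at index k, as both characterisations read it
def pvEnt (cm : List (String × List Int)) (k : Nat) : String × List Int := cm.getD k ("", [])

-- canonical pair score: both ports are proved equal to the double sum of this over index pairs
def pvTerm (cm : List (String × List Int)) (k m : Nat) : Int :=
  if 2 ≤ (pvEnt cm k).2.length ∧ 2 ≤ (pvEnt cm m).2.length ∧ k + 2 ≤ m ∧
      pvAdj (pvPt (pvEnt cm k)) (pvPt (pvEnt cm m)) then
    pvW (pvEnt cm k).1 (pvEnt cm m).1
  else 0

def pvS (cm : List (String × List Int)) : Int :=
  ((List.range cm.length).map (fun k =>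
    ((List.range cm.length).map (fun m => pvTerm cm k m)).sum)).sum

-- the single Int that one execution of A's inner-loop body adds to scoreH + scoreC
def pvFA (cm : List (String × List Int)) (i j : Int) : Int :=
  let current : List Int := ((PySem.List.pyGet? cm i).map (·.2)).getD []
  let next : List Int := ((PySem.List.pyGet? cm j).map (·.2)).getD []
  let ti : String := ((PySem.List.pyGet? cm i).map (·.1)).getD ""
  let tj : String := ((PySem.List.pyGet? cm j).map (·.1)).getD ""
  let c0 := PySem.List.pyGetD current 0 0
  let c1 := PySem.List.pyGetD current 1 0
  let n0 := PySem.List.pyGetD next 0 0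
  let n1 := PySem.List.pyGetD next 1 0
  if c0 = n0 ∧ (c1 = n1 - 1 ∨ c1 = n1 + 1) ∧ ti = "H" ∧ tj = "H" then (-1 : Int)
  else if c0 = n0 ∧ (c1 = n1 - 1 ∨ c1 = n1 + 1) ∧ ti = "H" ∧ tj = "C" then -1
  else if c0 = n0 ∧ (c1 = n1 - 1 ∨ c1 = n1 + 1) ∧ ti = "C" ∧ tj = "C" then -5
  else if c0 = n0 ∧ (c1 = n1 - 1 ∨ c1 = n1 + 1) ∧ ti = "C" ∧ tj = "H" then -1
  else if c1 = n1 ∧ (c0 = n0 - 1 ∨ c0 = n0 + 1) ∧ ti = "H" ∧ tj = "H" then -1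
  else if c1 = n1 ∧ (c0 = n0 - 1 ∨ c0 = n0 + 1) ∧ ti = "H" ∧ tj = "C" then -1
  else if c1 = n1 ∧ (c0 = n0 - 1 ∨ c0 = n0 + 1) ∧ ti = "C" ∧ tj = "C" then -5
  else if c1 = n1 ∧ (c0 = n0 - 1 ∨ c0 = n0 + 1) ∧ ti = "C" ∧ tj = "H" then -1
  else 0

-- generic: a fold over a pair accumulator whose component sum grows by g x per step
theorem pv_pair_foldl {α : Type} (f : Int × Int → α → Int × Int) (g : α → Int)
    (h : ∀ s x, (f s x).1 + (f s x).2 = s.1 + s.2 + g x) :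
    ∀ (l : List α) (s : Int × Int), (l.foldl f s).1 + (l.foldl f s).2 = s.1 + s.2 + (l.map g).sum := by
  intro l
  induction l with
  | nil => intro s; simp
  | cons x t ih => intro s; simp only [List.foldl_cons, List.map_cons, List.sum_cons]; rw [ih, h]; ring

theorem pv_body_sum (cm : List (String × List Int)) (i : Int) (s : Int × Int) (j : Int) :
    (scoreH_body cm i s j).1 + (scoreH_body cm i s j).2 = s.1 + s.2 + pvFA cm i j := by
  simp only [scoreH_body, pvFA]
  split_ifs <;> ring

-- A's eight-branch chain over abstract Boolean atoms, collapsed to "adjacent → weight"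
theorem pv_chain_bool : ∀ (a b c d th tc uh uc : Bool), (th && tc) = false → (uh && uc) = false →
    (if a && (b && (th && uh)) then (-1 : Int)
      else if a && (b && (th && uc)) then -1
      else if a && (b && (tc && uc)) then -5
      else if a && (b && (tc && uh)) then -1
      else if c && (d && (th && uh)) then -1
      else if c && (d && (th && uc)) then -1
      else if c && (d && (tc && uc)) then -5
      else if c && (d && (tc && uh)) then -1
      else 0)
    = if (a && b) || (c && d) then
        (if th then (if uh || uc then -1 else 0) else if tc then (if uc then -5 else if uh then -1 else 0) else 0)
      else 0 := by decide

theorem pv_delta_eq (c0 c1 n0 n1 : Int) (ti tj : String) :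
    (if c0 = n0 ∧ (c1 = n1 - 1 ∨ c1 = n1 + 1) ∧ ti = "H" ∧ tj = "H" then (-1 : Int)
      else if c0 = n0 ∧ (c1 = n1 - 1 ∨ c1 = n1 + 1) ∧ ti = "H" ∧ tj = "C" then -1
      else if c0 = n0 ∧ (c1 = n1 - 1 ∨ c1 = n1 + 1) ∧ ti = "C" ∧ tj = "C" then -5
      else if c0 = n0 ∧ (c1 = n1 - 1 ∨ c1 = n1 + 1) ∧ ti = "C" ∧ tj = "H" then -1
      else if c1 = n1 ∧ (c0 = n0 - 1 ∨ c0 = n0 + 1) ∧ ti = "H" ∧ tj = "H" then -1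
      else if c1 = n1 ∧ (c0 = n0 - 1 ∨ c0 = n0 + 1) ∧ ti = "H" ∧ tj = "C" then -1
      else if c1 = n1 ∧ (c0 = n0 - 1 ∨ c0 = n0 + 1) ∧ ti = "C" ∧ tj = "C" then -5
      else if c1 = n1 ∧ (c0 = n0 - 1 ∨ c0 = n0 + 1) ∧ ti = "C" ∧ tj = "H" then -1
      else 0)
    = if pvAdj (c0, c1) (n0, n1) then pvW ti tj else 0 := by
  have h1 : (decide (ti = "H") && decide (ti = "C")) = false := by
    by_cases h : ti = "H"
    · subst h; simp
    · simp [h]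
  have h2 : (decide (tj = "H") && decide (tj = "C")) = false := by
    by_cases h : tj = "H"
    · subst h; simp
    · simp [h]
  have H := pv_chain_bool (decide (c0 = n0)) (decide (c1 = n1 - 1 ∨ c1 = n1 + 1))
    (decide (c1 = n1)) (decide (c0 = n0 - 1 ∨ c0 = n0 + 1))
    (decide (ti = "H")) (decide (ti = "C")) (decide (tj = "H")) (decide (tj = "C")) h1 h2
  simp only [Bool.and_eq_true, Bool.or_eq_true, decide_eq_true_eq] at H
  simp only [pvAdj, pvW]
  exact H

-- A's inner/outer loops as a sum of pvFA over the two pyRanges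
theorem pv_A_sum (cm : List (String × List Int)) :
    scoreH cm =
      ((PySem.List.pyRange 0 (cm.length : Int) 1).map (fun i =>
        ((PySem.List.pyRange (i + 2) (cm.length : Int) 1).map (fun j => pvFA cm i j)).sum)).sum := by
  simp only [scoreH]
  rw [pv_pair_foldl
    (fun s i => (PySem.List.pyRange (i + 2) (cm.length : Int) 1).foldl (scoreH_body cm i) s)
    (fun i => ((PySem.List.pyRange (i + 2) (cm.length : Int) 1).map (fun j => pvFA cm i j)).sum)
    (fun s i => pv_pair_foldl (scoreH_body cm i) (pvFA cm i) (pv_body_sum cm i) _ s)]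
  simp

theorem pv_pyRange_nil {a b : Int} (h : b ≤ a) : PySem.List.pyRange a b 1 = [] := by
  rw [List.eq_nil_iff_forall_not_mem]
  intro x hx
  rw [PySem.List.mem_pyRange_one] at hx
  omega

-- sum over a Python range as an indicator sum over the full Nat range
theorem pv_sum_cast_filter (F : Int → Int) (a : Nat) :
    ∀ n : Nat, ((PySem.List.pyRange (a : Int) (n : Int) 1).map F).sum
      = ((List.range n).map (fun m => if a ≤ m then F (m : Int) else 0)).sum := by
  intro n
  induction n with
  | zero => rw [pv_pyRange_nil (by exact_mod_cast Nat.zero_le a)]; simp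
  | succ n ih =>
      rw [List.range_succ, List.map_append, List.sum_append]
      by_cases hab : a ≤ n
      · rw [show ((n + 1 : Nat) : Int) = (n : Int) + 1 by push_cast; ring,
          PySem.List.pyRange_one_succ_right (by exact_mod_cast hab),
          List.map_append, List.sum_append, ih]
        simp [hab]
      · rw [show ((n + 1 : Nat) : Int) = (n : Int) + 1 by push_cast; ring,
          pv_pyRange_nil (by exact_mod_cast Nat.le_of_not_lt (by omega))]
        have h1 : ((List.range n).map (fun m => if a ≤ m then F (m : Int) else 0)).sum = 0 := by
          apply List.sum_eq_zero
          intro x hx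
          rw [List.mem_map] at hx
          obtain ⟨m, hm, rfl⟩ := hx
          rw [if_neg (by simp at hm; omega)]
        simp [h1, hab]

theorem pv_zipIdx_eq (cm : List (String × List Int)) :
    cm.zipIdx = (List.range cm.length).map (fun k => (pvEnt cm k, k)) := by
  apply List.ext_getElem
  · simp
  · intro i h1 h2
    have h3 : i < cm.length := by simpa using h1
    simp [List.getElem_zipIdx, pvEnt, List.getElem?_eq_getElem h3]

-- A as a double sum over Nat index ranges
theorem pv_A_range (cm : List (String × List Int)) :
    scoreH cm =
      ((List.range cm.length).map (fun (k : Nat) =>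
        ((List.range cm.length).map (fun (m : Nat) =>
          if k + 2 ≤ m then pvFA cm (k : Int) (m : Int) else 0)).sum)).sum := by
  rw [pv_A_sum]
  have h0 := pv_sum_cast_filter
    (fun i => ((PySem.List.pyRange (i + 2) (cm.length : Int) 1).map (fun j => pvFA cm i j)).sum)
    0 cm.length
  rw [show ((0 : Nat) : Int) = (0 : Int) by simp] at h0
  rw [h0]
  refine congrArg List.sum (List.map_congr_left ?_)
  intro k hk
  rw [if_pos (Nat.zero_le k)]
  rw [show ((k : Int) + 2) = ((k + 2 : Nat) : Int) by push_cast; ring,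
    pv_sum_cast_filter (fun j => pvFA cm (k : Int) j) (k + 2) cm.length]

theorem pv_pre_len (cm : List (String × List Int)) (h : Pre_scoreH cm) (k : Nat)
    (hk : k < cm.length) (hcond : k + 2 < cm.length ∨ 2 ≤ k) : 2 ≤ (pvEnt cm k).2.length := by
  apply h (pvEnt cm k, k) _ hcond
  rw [pv_zipIdx_eq]
  exact List.mem_map.mpr ⟨k, List.mem_range.mpr hk, rfl⟩

theorem pv_fa_eq (cm : List (String × List Int)) (k m : Nat) (hk : k < cm.length) (hm : m < cm.length) :
    pvFA cm (k : Int) (m : Int) =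
      if pvAdj (pvPt (pvEnt cm k)) (pvPt (pvEnt cm m)) then pvW (pvEnt cm k).1 (pvEnt cm m).1
      else 0 := by
  have e1 : PySem.List.pyGet? cm (k : Int) = some (pvEnt cm k) := by
    rw [PySem.List.pyGet?_natCast, List.getElem?_eq_getElem hk]
    simp [pvEnt, List.getElem?_eq_getElem hk]
  have e2 : PySem.List.pyGet? cm (m : Int) = some (pvEnt cm m) := by
    rw [PySem.List.pyGet?_natCast, List.getElem?_eq_getElem hm]
    simp [pvEnt, List.getElem?_eq_getElem hm]
  simp only [pvFA, e1, e2, Option.map_some, Option.getD_some]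
  simp only [pvPt]
  exact pv_delta_eq _ _ _ _ _ _

-- A equals the canonical double sum, on Pre_
theorem pv_A_eq_S (cm : List (String × List Int)) (h : Pre_scoreH cm) : scoreH cm = pvS cm := by
  rw [pv_A_range, pvS]
  apply congrArg
  apply List.map_congr_left
  intro k hk
  rw [List.mem_range] at hk
  apply congrArg
  apply List.map_congr_left
  intro m hm
  rw [List.mem_range] at hm
  by_cases hkm : k + 2 ≤ m
  · have hl1 : 2 ≤ (pvEnt cm k).2.length := pv_pre_len cm h k hk (Or.inl (by omega))
    have hl2 : 2 ≤ (pvEnt cm m).2.length := pv_pre_len cm h m hm (Or.inr (by omega))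
    rw [if_pos hkm, pv_fa_eq cm k m hk hm, pvTerm]
    by_cases ha : pvAdj (pvPt (pvEnt cm k)) (pvPt (pvEnt cm m))
    · rw [if_pos ha, if_pos ⟨hl1, hl2, hkm, ha⟩]
    · rw [if_neg ha, if_neg (by tauto)]
  · rw [if_neg hkm, pvTerm, if_neg (by tauto)]

-- ===== B side =====

theorem pv_sum_filter_bool {α : Type} (l : List α) (p : α → Bool) (g : α → Int) :
    ((l.filter p).map g).sum = (l.map (fun x => if p x then g x else 0)).sum := by
  induction l with
  | nil => simp
  | cons x t ih => by_cases h : p x <;> simp [h, ih]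

theorem pv_index_getD (cm : List (String × List Int)) (c : Int × Int) :
    (scoreH_alt_index cm).getD c [] =
      ((List.range cm.length).filter
        (fun m => decide (2 ≤ (pvEnt cm m).2.length) &&
          ((PySem.List.pyGetD (pvEnt cm m).2 0 0, PySem.List.pyGetD (pvEnt cm m).2 1 0) == c))).map
        (fun m => (m, (pvEnt cm m).1)) := by
  simp only [scoreH_alt_index]
  rw [pv_zipIdx_eq, List.foldl_map]
  dsimp only
  rw [PySem.List.foldl_ite_eq_foldl_filter
    (p := fun k : Nat => 2 ≤ (pvEnt cm k).2.length)
    (f := fun (d : PySem.Dict (Int × Int) (List (Nat × String))) (k : Nat) =>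
      d.modify (PySem.List.pyGetD (pvEnt cm k).2 0 0, PySem.List.pyGetD (pvEnt cm k).2 1 0) []
        (· ++ [(k, (pvEnt cm k).1)]))
    (l := List.range cm.length) (init := PySem.Dict.empty)]
  rw [← List.foldl_map
    (f := fun k : Nat => ((PySem.List.pyGetD (pvEnt cm k).2 0 0, PySem.List.pyGetD (pvEnt cm k).2 1 0), (k, (pvEnt cm k).1)))
    (g := fun (d : PySem.Dict (Int × Int) (List (Nat × String))) p => d.modify p.1 [] (· ++ [p.2]))]
  rw [PySem.Dict.getD_foldl_modify_append]
  rw [List.filter_map, List.map_map, List.filter_filter]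
  simp only [PySem.Dict.getD_empty, List.nil_append, Function.comp_def]
  congr 1
  apply List.filter_congr
  intro m _
  simp [Bool.and_comm]

-- a += loop over (index, type) pairs keeping chain distance ≥ 2, as a filtered sum
theorem pv_inner_fold (lst : List (Nat × String)) (a : String) (k : Nat) :
    ∀ t : Int, lst.foldl (fun t ju => if k + 2 ≤ ju.1 then t + pvW a ju.2 else t) t
      = t + ((lst.filter (fun ju => decide (k + 2 ≤ ju.1))).map (fun ju => pvW a ju.2)).sum := by
  induction lst with
  | nil => intro t; simp
  | cons p rest ih =>
      intro t
      by_cases h : k + 2 ≤ p.1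
      · rw [List.foldl_cons, if_pos h, ih, List.filter_cons, if_pos (by simpa using h),
          List.map_cons, List.sum_cons]
        ring
      · rw [List.foldl_cons, if_neg h, ih, List.filter_cons, if_neg (by simpa using h)]

-- a running total over a list where each element adds G x is the sum of G
theorem pv_foldl_body_sum {α : Type} (l : List α) (F : Int → α → Int) (G : α → Int)
    (h : ∀ t x, x ∈ l → F t x = t + G x) : l.foldl F 0 = (l.map G).sum := by
  suffices H : ∀ t : Int, l.foldl F t = t + (l.map G).sum by
    rw [H 0]; ring
  induction l with
  | nil => intro t; simp
  | cons x rest ih =>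
      intro t
      simp only [List.foldl_cons, List.map_cons, List.sum_cons]
      rw [h t x List.mem_cons_self, ih (fun t y hy => h t y (List.mem_cons_of_mem x hy))]
      ring

-- the value B's neighbour scan contributes for index k
def pvTb (cm : List (String × List Int)) (k : Nat) : Int :=
  let x := (pvPt (pvEnt cm k)).1
  let y := (pvPt (pvEnt cm k)).2
  ([(x, y - 1), (x, y + 1), (x - 1, y), (x + 1, y)].map (fun nb =>
    ((((scoreH_alt_index cm).getD nb []).filter (fun ju => decide (k + 2 ≤ ju.1))).map
      (fun ju => pvW (pvEnt cm k).1 ju.2)).sum)).sum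

theorem pv_B_sum (cm : List (String × List Int)) :
    scoreH_alt cm =
      ((List.range cm.length).map (fun k =>
        if 2 ≤ (pvEnt cm k).2.length then pvTb cm k else 0)).sum := by
  simp only [scoreH_alt]
  rw [pv_zipIdx_eq, List.foldl_map]
  dsimp only
  apply pv_foldl_body_sum
  intro t k _
  by_cases hl : 2 ≤ (pvEnt cm k).2.length
  · simp only [if_pos hl, pvTb, pvPt, List.foldl_cons, List.foldl_nil,
      List.map_cons, List.map_nil, List.sum_cons, List.sum_nil]
    rw [pv_inner_fold, pv_inner_fold, pv_inner_fold, pv_inner_fold]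
    ring
  · simp [hl]

-- four indicator sums over the same index list collapse into one
theorem pv_sum4 {α : Type} (l : List α) (f1 f2 f3 f4 g : α → Int)
    (h : ∀ m ∈ l, f1 m + f2 m + f3 m + f4 m = g m) :
    (l.map f1).sum + ((l.map f2).sum + ((l.map f3).sum + (l.map f4).sum)) = (l.map g).sum := by
  induction l with
  | nil => simp
  | cons x rest ih =>
      simp only [List.map_cons, List.sum_cons]
      rw [← ih (fun m hm => h m (List.mem_cons_of_mem x hm))]
      have := h x List.mem_cons_self
      linarith

theorem pv_Tb_eq (cm : List (String × List Int)) (k : Nat) :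
    (if 2 ≤ (pvEnt cm k).2.length then pvTb cm k else 0)
      = ((List.range cm.length).map (fun m => pvTerm cm k m)).sum := by
  by_cases hl : 2 ≤ (pvEnt cm k).2.length
  · rw [if_pos hl]
    simp only [pvTb, List.map_cons, List.map_nil, List.sum_cons, List.sum_nil, add_zero]
    rw [pv_index_getD, pv_index_getD, pv_index_getD, pv_index_getD]
    rw [List.filter_map, List.filter_map, List.filter_map, List.filter_map]
    simp only [List.map_map, List.filter_filter, Function.comp_def]
    rw [pv_sum_filter_bool, pv_sum_filter_bool, pv_sum_filter_bool, pv_sum_filter_bool]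
    apply pv_sum4
    intro m _
    revert hl
    simp only [pvTerm, pvAdj, pvPt, Bool.and_eq_true, decide_eq_true_eq, beq_iff_eq,
      Prod.mk.injEq]
    generalize pvW (pvEnt cm k).1 (pvEnt cm m).1 = w
    intro hl
    split_ifs <;> omega
  · rw [if_neg hl]
    symm
    apply List.sum_eq_zero
    intro x hx
    rw [List.mem_map] at hx
    obtain ⟨m, _, rfl⟩ := hx
    rw [pvTerm, if_neg (by tauto)]

theorem pv_B_eq_S (cm : List (String × List Int)) : scoreH_alt cm = pvS cm := by
  rw [pv_B_sum, pvS]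
  apply congrArg
  apply List.map_congr_left
  intro k _
  exact pv_Tb_eq cm k

-- ===== VERDICT (by name: the statement is the Claim_ definition above) =====
theorem scoreH_spec : Claim_equal_scoreH := by
  intro cm _ hpre
  unfold Spec_scoreH
  rw [pv_A_eq_S cm hpre, pv_B_eq_S cm]
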